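-- pv_equiv track=rewrite | github.com/glenyeh0804/CIT-590 | Sep29_squarelotrons.py | left_right_flip
-- ===== SOURCE A (Python) =====
-- import copy
--
-- def left_right_flip(squarelotron, ring):
--     """Return a new squarelotron that is flipped left-right"""
--     new_squarelotron = copy.deepcopy(squarelotron)
--     if ring == 'outer':
--         for i in range(0, 5):
--             new_squarelotron[i][0], new_squarelotron[i][4] = new_squarelotron[i][4], new_squarelotron[i][0]
--         new_squarelotron[0][1], new_squarelotron[0][3] = new_squarelotron[0][3], new_squarelotron[0][1]
--         new_squarelotron[4][1], new_squarelotron[4][3] = new_squarelotron[4][3], new_squarelotron[4][1]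
--     if ring == 'inner':
--         for i in range(1, 4):
--             new_squarelotron[i][1], new_squarelotron[i][3] = new_squarelotron[i][3], new_squarelotron[i][1]
--     return new_squarelotron
-- ===== SOURCE B (Python) =====
-- import copy
--
-- def left_right_flip(squarelotron, ring):
--     """Return a new squarelotron that is flipped left-right"""
--     new = copy.deepcopy(squarelotron)
--     if ring == 'outer':
--         lo, hi = 0, 4
--     elif ring == 'inner':
--         lo, hi = 1, 3
--     else:
--         return new
--     for i in range(lo, hi + 1):
--         for j in range(lo, hi + 1):
--             if i == lo or i == hi or j == lo or j == hi:
--                 new[i][j] = squarelotron[i][lo + hi - j]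
--     return new
-- ===== Notes on version B (the rewrite author's own statement) =====
-- stated objective: simpler
-- what changed: Replaces A's enumerated pairwise tuple-swaps (a column loop plus four hand-written corner swaps) with a single generic mirror-assign pass over the ring band [lo,hi]^2 that reads mirrored columns from the untouched original.
import Mathlib
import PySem

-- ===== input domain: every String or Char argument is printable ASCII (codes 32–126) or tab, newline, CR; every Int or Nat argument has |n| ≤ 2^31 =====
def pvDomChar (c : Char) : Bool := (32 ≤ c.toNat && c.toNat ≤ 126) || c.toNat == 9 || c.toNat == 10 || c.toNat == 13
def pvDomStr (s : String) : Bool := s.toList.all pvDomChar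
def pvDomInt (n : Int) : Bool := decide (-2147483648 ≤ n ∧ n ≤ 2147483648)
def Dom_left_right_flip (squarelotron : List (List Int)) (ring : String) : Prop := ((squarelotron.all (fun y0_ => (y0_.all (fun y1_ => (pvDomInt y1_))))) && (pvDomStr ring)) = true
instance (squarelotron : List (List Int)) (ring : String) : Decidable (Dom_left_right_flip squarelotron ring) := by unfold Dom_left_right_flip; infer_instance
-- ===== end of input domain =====

-- B replaces A's enumerated pairwise swaps with one generic mirror-assign pass over the ring band
-- (objective: simpler). Equivalence is about the return value; neither program mutates its argument.

-- Indexing helpers shared by both ports; they are exact on Pre_ (all accesses in range):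
-- an out-of-range read returns 0 and an out-of-range write is dropped, where Python raises IndexError.
def getRow : List Int → Nat → Int
  | [], _ => 0
  | a :: _, 0 => a
  | _ :: t, n+1 => getRow t n

def getMat : List (List Int) → Nat → List Int
  | [], _ => []
  | r :: _, 0 => r
  | _ :: t, n+1 => getMat t n

def setRow : List Int → Nat → Int → List Int
  | [], _, _ => []
  | _ :: t, 0, v => v :: t
  | a :: t, n+1, v => a :: setRow t n v

def setMat : List (List Int) → Nat → Nat → Int → List (List Int)
  | [], _, _, _ => []
  | r :: t, 0, j, v => setRow r j v :: t
  | r :: t, i+1, j, v => r :: setMat t i j v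

def getv (m : List (List Int)) (i j : Nat) : Int := getRow (getMat m i) j

-- ===== PORT A =====
-- the tuple swap: reads both cells of the CURRENT matrix, then writes them exchanged
def swapCols (m : List (List Int)) (i j1 j2 : Nat) : List (List Int) :=
  let a := getv m i j1
  let b := getv m i j2
  setMat (setMat m i j1 b) i j2 a

def left_right_flip (squarelotron : List (List Int)) (ring : String) : List (List Int) :=
  let n := squarelotron  -- deepcopy: values are immutable here
  let n := if ring = "outer" then
      let n := (List.range 5).foldl (fun acc i => swapCols acc i 0 4) n
      let n := swapCols n 0 1 3
      swapCols n 4 1 3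
    else n
  let n := if ring = "inner" then
      (List.range' 1 3).foldl (fun acc i => swapCols acc i 1 3) n
    else n
  n

-- ===== PORT B =====
-- one mirror-assign pass over the band [lo,hi]², reading mirrored columns from the untouched original
def mirrorPass (orig new : List (List Int)) (lo hi : Nat) : List (List Int) :=
  (List.range' lo (hi + 1 - lo)).foldl (fun acc i =>
    (List.range' lo (hi + 1 - lo)).foldl (fun acc j =>
      if i = lo ∨ i = hi ∨ j = lo ∨ j = hi then
        setMat acc i j (getv orig i (lo + hi - j))
      else acc) acc) new

def left_right_flip_alt (squarelotron : List (List Int)) (ring : String) : List (List Int) :=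
  let new := squarelotron
  if ring = "outer" then mirrorPass squarelotron new 0 4
  else if ring = "inner" then mirrorPass squarelotron new 1 3
  else new

-- ===== PRECONDITION & SPEC =====
-- Pre_ excludes exactly the inputs where Python A raises IndexError: 'outer' needs 5 rows of length ≥ 5,
-- 'inner' needs rows 1..3 present with length ≥ 4 (B raises on the same inputs).
def Pre_left_right_flip (squarelotron : List (List Int)) (ring : String) : Prop :=
  (ring = "outer" → 5 ≤ squarelotron.length ∧ ∀ r ∈ squarelotron.take 5, 5 ≤ r.length) ∧
  (ring = "inner" → 4 ≤ squarelotron.length ∧ ∀ r ∈ (squarelotron.drop 1).take 3, 4 ≤ r.length)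
instance (squarelotron : List (List Int)) (ring : String) : Decidable (Pre_left_right_flip squarelotron ring) := by unfold Pre_left_right_flip; infer_instance

def pvWitness_left_right_flip : List (List Int) × String :=
  ([[1,2,3,4,5],[6,7,8,9,10],[11,12,13,14,15],[16,17,18,19,20],[21,22,23,24,25]], "outer")

def Spec_left_right_flip (squarelotron : List (List Int)) (ring : String) (out : List (List Int)) : Prop := out = left_right_flip_alt squarelotron ring
instance (squarelotron : List (List Int)) (ring : String) (out : List (List Int)) : Decidable (Spec_left_right_flip squarelotron ring out) := by unfold Spec_left_right_flip; infer_instance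

-- ===== CLAIM (what is proved, stated in full; the proofs are below) =====
def Claim_equal_left_right_flip : Prop := ∀ (squarelotron : List (List Int)) (ring : String), Dom_left_right_flip squarelotron ring → Pre_left_right_flip squarelotron ring → Spec_left_right_flip squarelotron ring (left_right_flip squarelotron ring)

-- ===== LEMMAS AND PROOFS =====

theorem len5_cons {α : Type} (l : List α) (h : 5 ≤ l.length) :
    ∃ a b c d e t, l = a :: b :: c :: d :: e :: t := by
  match l with
  | a :: b :: c :: d :: e :: t => exact ⟨a, b, c, d, e, t, rfl⟩
  | [] | [_] | [_,_] | [_,_,_] | [_,_,_,_] => simp at h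

theorem len4_cons {α : Type} (l : List α) (h : 4 ≤ l.length) :
    ∃ a b c d t, l = a :: b :: c :: d :: t := by
  match l with
  | a :: b :: c :: d :: t => exact ⟨a, b, c, d, t, rfl⟩
  | [] | [_] | [_,_] | [_,_,_] => simp at h

-- ===== VERDICT (by name: the statement is the Claim_ definition above) =====
theorem left_right_flip_spec : Claim_equal_left_right_flip := by
  intro m ring _ hpre
  obtain ⟨hout, hin⟩ := hpre
  show left_right_flip m ring = left_right_flip_alt m ring
  by_cases ho : ring = "outer"
  · subst ho
    obtain ⟨hlen, hrows⟩ := hout rfl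
    obtain ⟨r0, r1, r2, r3, r4, rest, rfl⟩ := len5_cons m hlen
    have h0 := hrows r0 (by simp)
    have h1 := hrows r1 (by simp)
    have h2 := hrows r2 (by simp)
    have h3 := hrows r3 (by simp)
    have h4 := hrows r4 (by simp)
    obtain ⟨a0, b0, c0, d0, e0, t0, rfl⟩ := len5_cons r0 h0
    obtain ⟨a1, b1, c1, d1, e1, t1, rfl⟩ := len5_cons r1 h1
    obtain ⟨a2, b2, c2, d2, e2, t2, rfl⟩ := len5_cons r2 h2
    obtain ⟨a3, b3, c3, d3, e3, t3, rfl⟩ := len5_cons r3 h3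
    obtain ⟨a4, b4, c4, d4, e4, t4, rfl⟩ := len5_cons r4 h4
    rfl
  · by_cases hi : ring = "inner"
    · subst hi
      obtain ⟨hlen, hrows⟩ := hin rfl
      obtain ⟨r0, r1, r2, r3, rest, rfl⟩ := len4_cons m hlen
      have h1 := hrows r1 (by simp)
      have h2 := hrows r2 (by simp)
      have h3 := hrows r3 (by simp)
      obtain ⟨a1, b1, c1, d1, t1, rfl⟩ := len4_cons r1 h1
      obtain ⟨a2, b2, c2, d2, t2, rfl⟩ := len4_cons r2 h2
      obtain ⟨a3, b3, c3, d3, t3, rfl⟩ := len4_cons r3 h3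
      simp [left_right_flip, left_right_flip_alt, ho]
      rfl
    · simp [left_right_flip, left_right_flip_alt, ho, hi]
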